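-- pv_equiv track=rewrite | github.com/sharanaakriti7-ai/ner_indian_archaelogy | clean_augment_data.py | parse_new_data
-- ===== SOURCE A (Python) =====
-- def parse_new_data(text):
--     """Parse new sentences from text format"""
--     sentences = []
--     current_sentence = []
--
--     lines = text.strip().split('\n')
--     for line in lines:
--         line = line.strip()
--         if not line:
--             if current_sentence:
--                 sentences.append(current_sentence)
--                 current_sentence = []
--         elif line.startswith('Sentence'):
--             continue
--         else:
--             parts = line.split()
--             if len(parts) == 2:
--                 token, label = parts
--                 current_sentence.append((token, label))
--
--     if current_sentence:
--         sentences.append(current_sentence)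
--
--     return sentences
-- ===== SOURCE B (Python) =====
-- def parse_new_data(text):
--     """Parse new sentences from text format"""
--     lines = [ln.strip() for ln in text.strip().split('\n')]
--     sentences = []
--     while lines:
--         if not lines[0]:
--             lines = lines[1:]
--             continue
--         k = 0
--         while k < len(lines) and lines[k]:
--             k += 1
--         block, lines = lines[:k], lines[k:]
--         pairs = [(p[0], p[1])
--                  for p in (ln.split() for ln in block
--                            if not ln.startswith('Sentence'))
--                  if len(p) == 2]
--         if pairs:
--             sentences.append(pairs)
--     return sentences
-- ===== Notes on version B (the rewrite author's own statement) =====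
-- stated objective: simpler
-- what changed: Replaces A's cross-iteration accumulator/flush state machine with a group-then-parse pass: strip all lines once, split them into maximal runs of non-blank lines, parse each run with a comprehension and keep the non-empty results.
import Mathlib
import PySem

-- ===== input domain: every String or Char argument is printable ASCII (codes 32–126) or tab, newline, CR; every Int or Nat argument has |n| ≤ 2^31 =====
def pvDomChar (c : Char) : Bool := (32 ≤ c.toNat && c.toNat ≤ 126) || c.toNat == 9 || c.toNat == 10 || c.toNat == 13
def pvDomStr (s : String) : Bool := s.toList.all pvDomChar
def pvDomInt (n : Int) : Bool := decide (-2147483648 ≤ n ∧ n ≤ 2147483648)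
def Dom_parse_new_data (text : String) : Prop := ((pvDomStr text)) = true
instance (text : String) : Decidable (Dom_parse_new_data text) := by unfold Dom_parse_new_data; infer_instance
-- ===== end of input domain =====

-- B replaces A's cross-iteration accumulator/flush state with a group-then-parse pass
-- (split stripped lines into maximal non-blank runs, parse each run, keep non-empty results): simpler decomposition, same cost.


-- ===== PORT A =====
-- one loop iteration of A, applied to the already-stripped line
def aStep (st : List (List (String × String)) × List (String × String)) (line : String) :
    List (List (String × String)) × List (String × String) :=
  if line = "" then
    if st.2 = [] then st else (st.1 ++ [st.2], [])
  else if PySem.Str.startswith line "Sentence" then st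
  else
    match PySem.Str.split₀ line with       -- 'parts = line.split(); if len(parts) == 2'
    | [token, label] => (st.1, st.2 ++ [(token, label)])
    | _ => st

def parse_new_data (text : String) : List (List (String × String)) :=
  -- text.strip().split('\n'); split? is some since the separator "\n" is non-empty
  let lines := (PySem.Str.split? (PySem.Str.strip text) "\n").getD []
  let st := lines.foldl (fun st line => aStep st (PySem.Str.strip line)) ([], [])
  if st.2 = [] then st.1 else st.1 ++ [st.2]

-- ===== PORT B =====
-- the comprehension over one block of non-blank stripped lines
def altPairs (block : List String) : List (String × String) :=
  (block.filter (fun ln => !(PySem.Str.startswith ln "Sentence"))).filterMap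
    (fun ln => match PySem.Str.split₀ ln with
               | [t, l] => some (t, l)
               | _ => none)

-- Source B's outer while loop over the remaining stripped lines
def altGo : List String → List (List (String × String))
  | [] => []
  | l :: ls =>
    if l = "" then altGo ls
    else
      let pairs := altPairs ((l :: ls).takeWhile (fun s => s != ""))
      (if pairs = [] then [] else [pairs]) ++ altGo ((l :: ls).dropWhile (fun s => s != ""))
  termination_by ms => ms.length
  decreasing_by
  · simp
  · simp only [List.dropWhile]
    have h' : (l != "") = true := by simpa using (by assumption : ¬ l = "")
    rw [h']
    exact Nat.lt_succ_of_le (List.length_dropWhile_le _ _)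

def parse_new_data_alt (text : String) : List (List (String × String)) :=
  altGo (((PySem.Str.split? (PySem.Str.strip text) "\n").getD []).map PySem.Str.strip)

-- ===== PRECONDITION & SPEC =====
def Spec_parse_new_data (text : String) (out : List (List (String × String))) : Prop := out = parse_new_data_alt text
instance (text : String) (out : List (List (String × String))) : Decidable (Spec_parse_new_data text out) := by unfold Spec_parse_new_data; infer_instance

-- ===== CLAIM (what is proved, stated in full; the proofs are below) =====
def Claim_equal_parse_new_data : Prop := ∀ (text : String), Dom_parse_new_data text → Spec_parse_new_data text (parse_new_data text)

-- ===== LEMMAS AND PROOFS =====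

-- A's trailing 'if current_sentence: sentences.append(current_sentence)'
def finishA (st : List (List (String × String)) × List (String × String)) : List (List (String × String)) :=
  if st.2 = [] then st.1 else st.1 ++ [st.2]

-- line-by-line reference semantics over already-stripped lines
def goL (cur : List (String × String)) : List String → List (List (String × String))
  | [] => if cur = [] then [] else [cur]
  | l :: ls =>
    if l = "" then (if cur = [] then goL [] ls else cur :: goL [] ls)
    else if PySem.Str.startswith l "Sentence" then goL cur ls
    else
      match PySem.Str.split₀ l with
      | [t, lb] => goL (cur ++ [(t, lb)]) ls
      | _ => goL cur ls

lemma altPairs_nil : altPairs [] = [] := rfl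

lemma altPairs_cons (m : String) (ms : List String) :
    altPairs (m :: ms) =
      (if PySem.Str.startswith m "Sentence" then []
       else (match PySem.Str.split₀ m with
             | [t, l] => [(t, l)]
             | _ => [])) ++ altPairs ms := by
  cases hS : PySem.Str.startswith m "Sentence" with
  | true =>
    simp only [altPairs, List.filter_cons, hS, Bool.not_true, Bool.false_eq_true, if_false,
      if_true, List.nil_append]
  | false =>
    simp only [altPairs, List.filter_cons, hS, Bool.not_false, if_true, Bool.false_eq_true,
      if_false, List.filterMap_cons]
    rcases PySem.Str.split₀ m with _ | ⟨t, _ | ⟨lb, _ | ⟨x, r⟩⟩⟩ <;> rfl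

lemma foldl_aStep (ls : List String) :
    ∀ acc cur,
      finishA (ls.foldl (fun st line => aStep st (PySem.Str.strip line)) (acc, cur)) =
        acc ++ goL cur (ls.map PySem.Str.strip) := by
  induction ls with
  | nil =>
    intro acc cur
    simp only [List.foldl_nil, List.map_nil, goL, finishA]
    split <;> simp
  | cons l ls ih =>
    intro acc cur
    simp only [List.foldl_cons, List.map_cons]
    by_cases h0 : PySem.Str.strip l = ""
    · by_cases hc : cur = []
      · subst hc
        have ha : aStep (acc, ([] : List (String × String))) (PySem.Str.strip l) = (acc, []) := by
          rw [aStep, if_pos h0, if_pos rfl]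
        rw [ha, ih, goL, h0, if_pos rfl, if_pos rfl]
      · have ha : aStep (acc, cur) (PySem.Str.strip l) = (acc ++ [cur], []) := by
          rw [aStep, if_pos h0, if_neg hc]
        rw [ha, ih, goL, h0, if_pos rfl, if_neg hc]
        simp
    · cases hS : PySem.Str.startswith (PySem.Str.strip l) "Sentence" with
      | true =>
        have ha : aStep (acc, cur) (PySem.Str.strip l) = (acc, cur) := by
          rw [aStep, if_neg h0, if_pos hS]
        rw [ha, ih, goL, if_neg h0, if_pos hS]
      | false =>
        have hSf : ¬ (PySem.Str.startswith (PySem.Str.strip l) "Sentence" = true) := by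
          rw [hS]; exact Bool.false_ne_true
        rcases hp : PySem.Str.split₀ (PySem.Str.strip l) with _ | ⟨t, _ | ⟨lb, _ | ⟨x, r⟩⟩⟩
        ·
          have ha : aStep (acc, cur) (PySem.Str.strip l) = (acc, cur) := by
            rw [aStep, if_neg h0, if_neg hSf, hp]
          rw [ha, goL, if_neg h0, if_neg hSf, hp]
          exact ih acc cur
        ·
          have ha : aStep (acc, cur) (PySem.Str.strip l) = (acc, cur) := by
            rw [aStep, if_neg h0, if_neg hSf, hp]
          rw [ha, goL, if_neg h0, if_neg hSf, hp]
          exact ih acc cur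
        ·
          have ha : aStep (acc, cur) (PySem.Str.strip l) = (acc, cur ++ [(t, lb)]) := by
            rw [aStep, if_neg h0, if_neg hSf, hp]
          rw [ha, goL, if_neg h0, if_neg hSf, hp]
          exact ih acc (cur ++ [(t, lb)])
        ·
          have ha : aStep (acc, cur) (PySem.Str.strip l) = (acc, cur) := by
            rw [aStep, if_neg h0, if_neg hSf, hp]
          rw [ha, goL, if_neg h0, if_neg hSf, hp]
          exact ih acc cur

-- one unfolding of altGo as 'emit the first block ++ recurse on the rest', valid for every ms
lemma altGo_block (ms : List String) :
    altGo ms =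
      (if altPairs (ms.takeWhile (fun s => s != "")) = []
       then []
       else [altPairs (ms.takeWhile (fun s => s != ""))]) ++
        altGo (ms.dropWhile (fun s => s != "")) := by
  match ms with
  | [] => simp [altGo, altPairs_nil]
  | m :: ms' =>
    by_cases hm : m = ""
    · subst hm
      have h1 : altGo ("" :: ms') = altGo ms' := by rw [altGo]; simp
      simp [altPairs_nil, h1]
    · rw [altGo, if_neg hm]

lemma goL_eq (ms : List String) :
    ∀ cur,
      goL cur ms =
        (if cur ++ altPairs (ms.takeWhile (fun s => s != "")) = []
         then []
         else [cur ++ altPairs (ms.takeWhile (fun s => s != ""))]) ++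
          altGo (ms.dropWhile (fun s => s != "")) := by
  induction ms with
  | nil =>
    intro cur
    simp only [goL, List.takeWhile_nil, List.dropWhile_nil, altPairs_nil, List.append_nil]
    rw [altGo]
    split <;> simp
  | cons m ms' ih =>
    intro cur
    by_cases hm : m = ""
    · subst hm
      have hms' : goL [] ms' = altGo ms' := by
        rw [ih, altGo_block ms']
        simp
      rw [goL, if_pos rfl]
      simp only [List.takeWhile_cons, List.dropWhile_cons, bne_self_eq_false,
        Bool.false_eq_true, if_false, altPairs_nil, List.append_nil]
      rw [show altGo ("" :: ms') = altGo ms' from by rw [altGo, if_pos rfl], hms']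
      by_cases hc : cur = [] <;> simp [hc]
    · have hb : (m != "") = true := by simpa using hm
      simp only [List.takeWhile_cons, List.dropWhile_cons, hb, if_true]
      cases hS : PySem.Str.startswith m "Sentence" with
      | true =>
        rw [goL, if_neg hm, if_pos hS, ih, altPairs_cons, hS]
        simp
      | false =>
        have hSf : ¬ (PySem.Str.startswith m "Sentence" = true) := by
          rw [hS]; exact Bool.false_ne_true
        rcases hp : PySem.Str.split₀ m with _ | ⟨t, _ | ⟨lb, _ | ⟨x, r⟩⟩⟩
        ·
          rw [goL, if_neg hm, if_neg hSf, hp, altPairs_cons, hS, hp]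
          simp [ih]
        ·
          rw [goL, if_neg hm, if_neg hSf, hp, altPairs_cons, hS, hp]
          simp [ih]
        ·
          rw [goL, if_neg hm, if_neg hSf, hp, altPairs_cons, hS, hp]
          simp [ih]
        ·
          rw [goL, if_neg hm, if_neg hSf, hp, altPairs_cons, hS, hp]
          simp [ih]

-- ===== VERDICT (by name: the statement is the Claim_ definition above) =====
theorem parse_new_data_spec : Claim_equal_parse_new_data := by
  have key : ∀ ls : List String,
      finishA (ls.foldl (fun st line => aStep st (PySem.Str.strip line)) ([], [])) =
        altGo (ls.map PySem.Str.strip) := by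
    intro ls
    rw [foldl_aStep, goL_eq, altGo_block (ls.map PySem.Str.strip)]
    simp
  intro text _
  show parse_new_data text = parse_new_data_alt text
  exact key ((PySem.Str.split? (PySem.Str.strip text) "\n").getD [])
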